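-- pv_equiv track=rewrite | github.com/Shehrambaig/mailer | scripts/build_stacked.py | zillow_metro_to_cbsa
-- ===== SOURCE A (Python) =====
-- def zillow_metro_to_cbsa(zillow_metros, realtor_metros):
--     """Map Zillow RegionID → Realtor cbsa_code by primary-city + state match."""
--     idx = {}
--     for cbsa, title in realtor_metros.items():
--         if "," not in title:
--             continue
--         cities, states = title.rsplit(", ", 1)
--         first_city = cities.split("-")[0].strip().lower()
--         first_state = states.split("-")[0].strip().upper()
--         idx.setdefault((first_city, first_state), cbsa)
--     out = {}
--     for rid, m in zillow_metros.items():
--         name = m["name"]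
--         if "," not in name:
--             continue
--         c, s = name.rsplit(", ", 1)
--         c = c.split("-")[0].strip().lower()
--         s = s.strip().upper()
--         cbsa = idx.get((c, s))
--         if cbsa:
--             out[rid] = cbsa
--     return out
-- ===== SOURCE B (Python) =====
-- def zillow_metro_to_cbsa(zillow_metros, realtor_metros):
--     """Map Zillow RegionID -> Realtor cbsa_code by primary-city + state match."""
--     def key(t, split_state):
--         cities, states = t.rsplit(", ", 1)
--         if split_state:
--             states = states.split("-")[0]
--         return (cities.split("-")[0].strip().lower(), states.strip().upper())
--
--     def match(name):
--         k = key(name, False)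
--         return next((cbsa for cbsa, title in realtor_metros.items()
--                      if "," in title and key(title, True) == k), None)
--
--     return {rid: cbsa
--             for rid, m in zillow_metros.items()
--             for name in [m["name"]]
--             if "," in name
--             for cbsa in [match(name)]
--             if cbsa}
-- ===== Notes on version B (the rewrite author's own statement) =====
-- stated objective: alternative
-- what changed: Replaces A's two imperative dict-building loops (a setdefault index then an out-dict loop) with a single dict comprehension over zillow entries that finds each mapping by a lazy first-match scan (next over a generator) of realtor_metros, parsing titles on demand with one shared key helper instead of A's precomputed index.
import Mathlib
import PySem

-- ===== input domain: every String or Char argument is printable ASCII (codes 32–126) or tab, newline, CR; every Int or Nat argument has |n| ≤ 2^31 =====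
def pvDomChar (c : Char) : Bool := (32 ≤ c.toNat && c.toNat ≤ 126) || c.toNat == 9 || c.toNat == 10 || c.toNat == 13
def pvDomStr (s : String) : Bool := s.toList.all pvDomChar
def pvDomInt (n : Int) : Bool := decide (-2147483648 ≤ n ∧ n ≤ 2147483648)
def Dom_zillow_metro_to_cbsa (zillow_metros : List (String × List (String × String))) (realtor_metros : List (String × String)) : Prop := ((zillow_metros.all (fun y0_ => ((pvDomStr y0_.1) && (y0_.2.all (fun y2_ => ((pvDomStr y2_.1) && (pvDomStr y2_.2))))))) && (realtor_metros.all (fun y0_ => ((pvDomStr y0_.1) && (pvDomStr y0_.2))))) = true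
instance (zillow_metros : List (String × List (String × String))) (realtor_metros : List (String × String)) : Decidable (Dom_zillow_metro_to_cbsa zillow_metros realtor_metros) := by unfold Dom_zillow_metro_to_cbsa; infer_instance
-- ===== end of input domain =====

-- B replaces A's two dict-building loops (setdefault index + out loop) with one dict
-- comprehension doing a lazy first-match scan of realtor_metros per zillow entry
-- (objective: alternative decomposition, not faster).

-- ===== PORT A =====
-- t.rsplit(", ", 1) on a string containing ", " → (t[:i], t[i+2:]) at the last occurrence
def zmcRsplit (t : String) : String × String :=
  let i := PySem.Str.rfind t ", "
  (PySem.Str.slice t none (some i), PySem.Str.slice t (some (i + 2)) none)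

-- cities.split("-")[0].strip().lower()
def zmcCity (cities : String) : String :=
  PySem.Str.lower (PySem.Str.strip (((PySem.Str.split? cities "-").getD []).headD ""))

-- realtor side: (first_city, first_state) with states.split("-")[0].strip().upper()
def zmcParseTitle (title : String) : String × String :=
  let p := zmcRsplit title
  (zmcCity p.1, PySem.Str.upper (PySem.Str.strip (((PySem.Str.split? p.2 "-").getD []).headD "")))

-- zillow side: states only stripped/uppered, no split("-")
def zmcParseName (name : String) : String × String :=
  let p := zmcRsplit name
  (zmcCity p.1, PySem.Str.upper (PySem.Str.strip p.2))

-- A's first loop: idx.setdefault((first_city, first_state), cbsa)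
def zmcIdx (realtor_metros : List (String × String)) : PySem.Dict (String × String) String :=
  realtor_metros.foldl (fun idx p =>
    if PySem.Str.isIn "," p.2 = false then idx
    else idx.setdefault (zmcParseTitle p.2) p.1) PySem.Dict.empty

def zillow_metro_to_cbsa (zillow_metros : List (String × List (String × String))) (realtor_metros : List (String × String)) : List (String × String) :=
  let idx := zmcIdx realtor_metros
  (zillow_metros.foldl (fun out p =>
    match (PySem.Dict.mk p.2).get? "name" with
    | none => out  -- Python raises KeyError here; excluded by Pre_
    | some name =>
      if PySem.Str.isIn "," name = false then out
      else
        match idx.get? (zmcParseName name) with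
        | some cbsa => if cbsa ≠ "" then out.insert p.1 cbsa else out  -- `if cbsa:` truthiness
        | none => out) PySem.Dict.empty).items

-- ===== PORT B =====
-- B's single parsing helper key(t, split_state)
def bKey (t : String) (splitState : Bool) : String × String :=
  let cities := PySem.Str.slice t none (some (PySem.Str.rfind t ", "))
  let states := PySem.Str.slice t (some (PySem.Str.rfind t ", " + 2)) none
  let states := if splitState then ((PySem.Str.split? states "-").getD []).headD "" else states
  (PySem.Str.lower (PySem.Str.strip (((PySem.Str.split? cities "-").getD []).headD "")),
   PySem.Str.upper (PySem.Str.strip states))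

-- B's match(name): next((cbsa for cbsa, title in realtor_metros.items()
--                        if "," in title and key(title, True) == k), None)
def bMatch (realtor_metros : List (String × String)) (name : String) : Option String :=
  let k := bKey name false
  (realtor_metros.find? (fun q => PySem.Str.isIn "," q.2 && bKey q.2 true == k)).map (·.1)

-- the dict comprehension, one clause per `for`/`if` of Source B
def zillow_metro_to_cbsa_alt (zillow_metros : List (String × List (String × String))) (realtor_metros : List (String × String)) : List (String × String) :=
  zillow_metros.filterMap (fun p =>
    ((PySem.Dict.mk p.2).get? "name").bind (fun name =>   -- Python raises KeyError on none; excluded by Pre_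
      if PySem.Str.isIn "," name = false then none
      else (bMatch realtor_metros name).bind (fun cbsa =>
        if cbsa ≠ "" then some (p.1, cbsa) else none)))   -- `if cbsa:` truthiness

-- ===== PRECONDITION & SPEC =====
-- Pre_ excludes (a) inputs where Python A raises: a realtor title or a zillow name containing
-- "," but not ", " (ValueError from rsplit unpacking) or a zillow metro dict without a "name"
-- key (KeyError); and (b) association lists with duplicate keys at any of the three dict
-- positions, which cannot arise from the Python dicts both functions receive (there the
-- list's extra entries and A's dict overwrite order are representation accidents).
def Pre_zillow_metro_to_cbsa (zillow_metros : List (String × List (String × String))) (realtor_metros : List (String × String)) : Prop :=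
  (∀ p ∈ realtor_metros, PySem.Str.isIn "," p.2 = true → PySem.Str.isIn ", " p.2 = true) ∧
  (∀ p ∈ zillow_metros,
    ((PySem.Dict.mk p.2).get? "name").isSome = true ∧
    (PySem.Str.isIn "," (((PySem.Dict.mk p.2).get? "name").getD "") = true →
     PySem.Str.isIn ", " (((PySem.Dict.mk p.2).get? "name").getD "") = true)) ∧
  (zillow_metros.map (·.1)).Nodup ∧
  (realtor_metros.map (·.1)).Nodup ∧
  (∀ p ∈ zillow_metros, (p.2.map (·.1)).Nodup)
instance (zillow_metros : List (String × List (String × String))) (realtor_metros : List (String × String)) : Decidable (Pre_zillow_metro_to_cbsa zillow_metros realtor_metros) := by unfold Pre_zillow_metro_to_cbsa; infer_instance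

def pvWitness_zillow_metro_to_cbsa : (List (String × List (String × String))) × (List (String × String)) :=
  ([("1", [("name", "New York, NY")])], [("100", "New York-Newark, NY-NJ")])

def Spec_zillow_metro_to_cbsa (zillow_metros : List (String × List (String × String))) (realtor_metros : List (String × String)) (out : List (String × String)) : Prop := out = zillow_metro_to_cbsa_alt zillow_metros realtor_metros
instance (zillow_metros : List (String × List (String × String))) (realtor_metros : List (String × String)) (out : List (String × String)) : Decidable (Spec_zillow_metro_to_cbsa zillow_metros realtor_metros out) := by unfold Spec_zillow_metro_to_cbsa; infer_instance

-- ===== CLAIM (what is proved, stated in full; the proofs are below) =====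
def Claim_equal_zillow_metro_to_cbsa : Prop := ∀ (zillow_metros : List (String × List (String × String))) (realtor_metros : List (String × String)), Dom_zillow_metro_to_cbsa zillow_metros realtor_metros → Pre_zillow_metro_to_cbsa zillow_metros realtor_metros → Spec_zillow_metro_to_cbsa zillow_metros realtor_metros (zillow_metro_to_cbsa zillow_metros realtor_metros)

-- ===== LEMMAS AND PROOFS =====

-- the setdefault-built index looks up to the first matching realtor entry
lemma zmcIdx_get (realtor_metros : List (String × String))
    (d : PySem.Dict (String × String) String) (k : String × String) :
    (realtor_metros.foldl (fun idx p =>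
      if PySem.Str.isIn "," p.2 = false then idx
      else idx.setdefault (zmcParseTitle p.2) p.1) d).get? k
      = (d.get? k).or
        ((realtor_metros.find? (fun q => PySem.Str.isIn "," q.2 && zmcParseTitle q.2 == k)).map (·.1)) := by
  induction realtor_metros generalizing d with
  | nil => simp
  | cons p rest ih =>
    rw [List.foldl_cons, ih, List.find?_cons]
    cases hc : PySem.Str.isIn "," p.2 with
    | false => simp only [hc, Bool.false_and, reduceIte]
    | true =>
      simp only [hc, Bool.true_eq_false, Bool.true_and, reduceIte]
      by_cases hk : zmcParseTitle p.2 = k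
      · subst hk
        rw [PySem.Dict.get?_setdefault_self]
        simp only [beq_self_eq_true]
        cases d.get? (zmcParseTitle p.2) <;> simp
      · rw [PySem.Dict.get?_setdefault_of_ne d p.1 (Ne.symm hk)]
        simp only [beq_eq_false_iff_ne.mpr hk, Bool.false_eq_true]

lemma zmcIdx_get_eq_bMatch (realtor_metros : List (String × String)) (name : String) :
    (zmcIdx realtor_metros).get? (zmcParseName name) = bMatch realtor_metros name := by
  unfold zmcIdx bMatch
  rw [zmcIdx_get]
  rfl

-- A's out-building loop over fresh, pairwise-distinct keys produces exactly the filterMap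
-- of its per-entry result
lemma zmc_loop_items (r : List (String × String))
    (z : List (String × List (String × String))) (d : PySem.Dict String String)
    (hnd : (z.map (·.1)).Nodup) (hfresh : ∀ p ∈ z, d.contains p.1 = false) :
    (z.foldl (fun out p =>
      match (PySem.Dict.mk p.2).get? "name" with
      | none => out
      | some name =>
        if PySem.Str.isIn "," name = false then out
        else
          match (zmcIdx r).get? (zmcParseName name) with
          | some cbsa => if cbsa ≠ "" then out.insert p.1 cbsa else out
          | none => out) d).items
    = d.items ++ z.filterMap (fun p =>
        ((PySem.Dict.mk p.2).get? "name").bind (fun name =>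
          if PySem.Str.isIn "," name = false then none
          else ((zmcIdx r).get? (zmcParseName name)).bind (fun cbsa =>
            if cbsa ≠ "" then some (p.1, cbsa) else none))) := by
  induction z generalizing d with
  | nil => simp
  | cons p rest ih =>
    simp only [List.map_cons, List.nodup_cons] at hnd
    have hfp : d.contains p.1 = false := hfresh p (List.mem_cons_self ..)
    have hfrest : ∀ q ∈ rest, d.contains q.1 = false := fun q hq => hfresh q (List.mem_cons_of_mem _ hq)
    rw [List.foldl_cons, List.filterMap_cons]
    cases hname : (PySem.Dict.mk p.2).get? "name" with
    | none =>
      simp only [Option.bind_none]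
      exact ih d hnd.2 hfrest
    | some name =>
      simp only [Option.bind_some]
      cases hcomma : PySem.Str.isIn "," name with
      | false =>
        simp only [reduceIte]
        exact ih d hnd.2 hfrest
      | true =>
        simp only [Bool.true_eq_false, reduceIte]
        cases hlk : (zmcIdx r).get? (zmcParseName name) with
        | none =>
          simp only [Option.bind_none]
          exact ih d hnd.2 hfrest
        | some cbsa =>
          simp only [Option.bind_some]
          by_cases hne : cbsa = ""
          · subst hne
            simp only [ne_eq, not_true_eq_false, reduceIte]
            exact ih d hnd.2 hfrest
          · have hins : ∀ q ∈ rest, (d.insert p.1 cbsa).contains q.1 = false := by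
              intro q hq
              rw [PySem.Dict.contains_insert]
              have hq1 : q.1 ≠ p.1 := fun h => hnd.1 (h ▸ List.mem_map_of_mem hq)
              simp [hq1, hfrest q hq]
            have h := ih (d.insert p.1 cbsa) hnd.2 hins
            rw [PySem.Dict.items_insert_of_not_contains (h := hfp)] at h
            rw [if_pos hne, if_pos hne, h, List.append_assoc, List.singleton_append]

-- ===== VERDICT (by name: the statement is the Claim_ definition above) =====
theorem zillow_metro_to_cbsa_spec : Claim_equal_zillow_metro_to_cbsa := by
  intro z r _ hpre
  unfold Spec_zillow_metro_to_cbsa zillow_metro_to_cbsa zillow_metro_to_cbsa_alt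
  rw [zmc_loop_items r z PySem.Dict.empty hpre.2.2.1 (by intro q _; simp)]
  simp [zmcIdx_get_eq_bMatch, PySem.Dict.empty]
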